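-- pv_equiv track=rewrite | github.com/AmirsamanAhmadi/iTrade | services/news_service.py | _map_to_currencies
-- ===== SOURCE A (Python) =====
-- from typing import List, Dict, Optional
--
-- def _map_to_currencies(headline: str) -> List[str]:
--     s = headline.lower()
--     # find positions to preserve order of mention in the headline
--     def first_index(variants):
--         indices = [s.find(v) for v in variants]
--         indices = [i for i in indices if i >= 0]
--         return min(indices) if indices else -1
--
--     positions = []
--     eur_idx = first_index(['eur', 'euro', 'euros'])
--     usd_idx = first_index(['usd', 'dollar', 'dollars'])
--     if eur_idx >= 0:
--         positions.append(('EUR', eur_idx))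
--     if usd_idx >= 0:
--         positions.append(('USD', usd_idx))
--     positions = sorted(positions, key=lambda x: x[1])
--     return [p[0] for p in positions]
-- ===== SOURCE B (Python) =====
-- def _map_to_currencies(headline):
--     # One ordered left-to-right scan: at each position detect a currency mention
--     # ('eur' covers euro/euros, 'dollar' covers dollars) and append it the first
--     # time it is seen, yielding first-mention order directly without min()/sort.
--     s = headline.lower()
--     out = []
--     for i in range(len(s)):
--         if s.startswith('eur', i):
--             if 'EUR' not in out:
--                 out.append('EUR')
--         elif s.startswith('usd', i) or s.startswith('dollar', i):
--             if 'USD' not in out: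
--                 out.append('USD')
--     return out
-- ===== Notes on version B (the rewrite author's own statement) =====
-- stated objective: simpler
-- what changed: Replaces the per-variant find() + min() + explicit sort decomposition by a single left-to-right scan over the lowered headline that detects a currency mention at each position ('eur' and 'dollar' suffice as prefixes of the longer variants) and appends it on first mention, yielding first-mention order directly.
import Mathlib
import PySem

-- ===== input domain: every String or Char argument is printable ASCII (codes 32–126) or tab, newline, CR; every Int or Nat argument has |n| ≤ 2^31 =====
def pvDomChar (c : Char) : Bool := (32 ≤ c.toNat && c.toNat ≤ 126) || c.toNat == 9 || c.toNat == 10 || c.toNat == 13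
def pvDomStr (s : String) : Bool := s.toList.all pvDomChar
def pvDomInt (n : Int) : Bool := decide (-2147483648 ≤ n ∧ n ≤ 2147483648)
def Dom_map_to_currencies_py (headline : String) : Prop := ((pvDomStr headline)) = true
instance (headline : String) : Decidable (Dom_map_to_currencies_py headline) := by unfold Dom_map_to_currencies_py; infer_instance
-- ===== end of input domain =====

-- B replaces A's per-variant find + min + sort decomposition by one ordered scan with
-- first-mention dedup (objective: simpler); same return value on every input, no side effects.

-- ===== PORT A =====
def pvFirstIndex (s : List Char) (variants : List (List Char)) : Int :=
  let indices := variants.map (fun v => PySem.Chars.find s v)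
  let indices2 := indices.filter (fun i => decide (0 ≤ i))
  match PySem.List.min? indices2 (fun i => i) with
  | some m => m
  | none => -1

def map_to_currencies_py (headline : String) : List String :=
  let s := PySem.Chars.lower headline.toList
  let eur_idx := pvFirstIndex s ["eur".toList, "euro".toList, "euros".toList]
  let usd_idx := pvFirstIndex s ["usd".toList, "dollar".toList, "dollars".toList]
  let positions : List (String × Int) := []
  let positions := if 0 ≤ eur_idx then positions ++ [("EUR", eur_idx)] else positions
  let positions := if 0 ≤ usd_idx then positions ++ [("USD", usd_idx)] else positions
  let positions := PySem.List.sorted positions (fun x => x.2) false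
  positions.map (fun p => p.1)

-- ===== PORT B =====
def map_to_currencies_py_alt (headline : String) : List String :=
  let s := PySem.Chars.lower headline.toList
  (List.range s.length).foldl (fun out i =>
    if PySem.Chars.startswith (s.drop i) "eur".toList then
      if "EUR" ∈ out then out else out ++ ["EUR"]
    else if PySem.Chars.startswith (s.drop i) "usd".toList
         || PySem.Chars.startswith (s.drop i) "dollar".toList then
      if "USD" ∈ out then out else out ++ ["USD"]
    else out) []

-- ===== PRECONDITION & SPEC =====
def Spec_map_to_currencies_py (headline : String) (out : List String) : Prop := out = map_to_currencies_py_alt headline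
instance (headline : String) (out : List String) : Decidable (Spec_map_to_currencies_py headline out) := by unfold Spec_map_to_currencies_py; infer_instance

-- ===== CLAIM (what is proved, stated in full; the proofs are below) =====
def Claim_equal_map_to_currencies_py : Prop := ∀ (headline : String), Dom_map_to_currencies_py headline → Spec_map_to_currencies_py headline (map_to_currencies_py headline)

-- ===== LEMMAS AND PROOFS =====

-- occurrence of `sub` as a prefix of some suffix of cs
def pvOcc (cs sub : List Char) (i : Nat) : Prop := sub <+: cs.drop i

-- one step of B's dedup-append, and the tag B assigns to position i
def pvAdd (out : List String) (t : String) : List String :=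
  if t ∈ out then out else out ++ [t]

def pvTag (cs : List Char) (i : Nat) : Option String :=
  if PySem.Chars.startswith (cs.drop i) "eur".toList then some "EUR"
  else if PySem.Chars.startswith (cs.drop i) "usd".toList
       || PySem.Chars.startswith (cs.drop i) "dollar".toList then some "USD"
  else none

lemma pvOcc_lt_length {cs sub : List Char} {i : Nat} (hs : sub ≠ []) (h : pvOcc cs sub i) :
    i < cs.length := by
  by_contra hn
  have : cs.drop i = [] := List.drop_eq_nil_of_le (by omega)
  rw [pvOcc, this, List.prefix_nil] at h
  exact hs h

-- find as least occurrence, in pvOcc terms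
lemma pvFind_eq_neg_one_iff (cs sub : List Char) :
    PySem.Chars.find cs sub = -1 ↔ ¬ ∃ i, pvOcc cs sub i := by
  rw [PySem.Chars.find_eq_neg_one_iff]
  constructor
  · intro h ⟨i, hi⟩
    exact h (List.infix_iff_prefix_suffix.mpr ⟨_, hi, (List.drop_suffix i cs)⟩ )
  · intro h hinf
    have := (PySem.Chars.exists_prefix_drop_iff_isIn sub cs).2
      (PySem.Chars.isIn_iff_infix sub cs |>.mpr hinf)
    exact h this

lemma pvFind_spec {cs sub : List Char} (h : PySem.Chars.find cs sub ≠ -1) :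
    0 ≤ PySem.Chars.find cs sub ∧ pvOcc cs sub (PySem.Chars.find cs sub).toNat ∧
      ∀ i, pvOcc cs sub i → (PySem.Chars.find cs sub).toNat ≤ i := by
  have h0 : 0 ≤ PySem.Chars.find cs sub := by
    have := PySem.Chars.neg_one_le_find cs sub
    omega
  obtain ⟨h1, h2⟩ := PySem.Chars.find_spec (s := cs) (sub := sub) h0
  exact ⟨h0, h1, fun i hi => by by_contra hn; exact h2 i (by omega) hi⟩

-- a prefix of a prefix: occurrences of v are occurrences of u, so find u ≤ find v
lemma pvFind_le_of_prefix {cs u v : List Char} (huv : u <+: v)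
    (hv : PySem.Chars.find cs v ≠ -1) :
    PySem.Chars.find cs u ≠ -1 ∧ PySem.Chars.find cs u ≤ PySem.Chars.find cs v := by
  obtain ⟨hv0, hvocc, _⟩ := pvFind_spec hv
  have huocc : pvOcc cs u (PySem.Chars.find cs v).toNat := huv.trans hvocc
  have hu : PySem.Chars.find cs u ≠ -1 := by
    rw [ne_eq, pvFind_eq_neg_one_iff]
    exact fun h => h ⟨_, huocc⟩
  obtain ⟨hu0, _, humin⟩ := pvFind_spec hu
  exact ⟨hu, by have := humin _ huocc; omega⟩


lemma pvMin3_first (f1 f2 f3 : Int) (hb1 : -1 ≤ f1)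
    (h2 : f2 ≠ -1 → f1 ≠ -1 ∧ f1 ≤ f2) (h3 : f3 ≠ -1 → f1 ≠ -1 ∧ f1 ≤ f3) :
    (match PySem.List.min? (([f1, f2, f3]).filter (fun i => decide (0 ≤ i))) (fun i => i) with
     | some m => m
     | none => -1) = f1 := by
  rcases eq_or_lt_of_le hb1 with e1 | l1
  · have e2 : f2 = -1 := by by_contra h; exact (h2 h).1 e1.symm
    have e3 : f3 = -1 := by by_contra h; exact (h3 h).1 e1.symm
    subst e2; subst e3
    rw [← e1]
    simp [PySem.List.min?]
  · have c1 : 0 ≤ f1 := by omega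
    by_cases c2 : 0 ≤ f2 <;> by_cases c3 : 0 ≤ f3
    · have u2 := h2 (by omega); have u3 := h3 (by omega)
      simp [c1, c2, c3, PySem.List.min?_id_cons, min_def]
      split_ifs <;> omega
    · have u2 := h2 (by omega)
      simp [c1, c2, c3, PySem.List.min?_id_cons, min_def]
      omega
    · have u3 := h3 (by omega)
      simp [c1, c2, c3, PySem.List.min?_id_cons, min_def]
      omega
    · simp [c1, c2, c3, PySem.List.min?_id_cons]

lemma pvMin3_pair (f1 f2 f3 : Int) (hb1 : -1 ≤ f1) (hb2 : -1 ≤ f2)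
    (h3 : f3 ≠ -1 → f2 ≠ -1 ∧ f2 ≤ f3) :
    (match PySem.List.min? (([f1, f2, f3]).filter (fun i => decide (0 ≤ i))) (fun i => i) with
     | some m => m
     | none => -1) =
    (if f1 = -1 then f2 else if f2 = -1 then f1 else min f1 f2) := by
  by_cases c1 : 0 ≤ f1 <;> by_cases c2 : 0 ≤ f2 <;> by_cases c3 : 0 ≤ f3
  · have u3 := h3 (by omega)
    rw [if_neg (by omega : ¬ f1 = -1), if_neg (by omega : ¬ f2 = -1)]
    simp [c1, c2, c3, PySem.List.min?_id_cons, min_def]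
    omega
  · rw [if_neg (by omega : ¬ f1 = -1), if_neg (by omega : ¬ f2 = -1)]
    simp [c1, c2, c3, PySem.List.min?_id_cons]
  · exfalso; have := h3 (by omega); omega
  · rw [if_neg (by omega : ¬ f1 = -1), if_pos (by omega : f2 = -1)]
    simp [c1, c2, c3, PySem.List.min?_id_cons]
  · have u3 := h3 (by omega)
    have e1 : f1 = -1 := by omega
    rw [if_pos e1]
    simp [c1, c2, c3, PySem.List.min?_id_cons, min_def]
    omega
  · have e1 : f1 = -1 := by omega
    rw [if_pos e1]
    simp [c1, c2, c3, PySem.List.min?_id_cons]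
  · exfalso; have := h3 (by omega); omega
  · have e1 : f1 = -1 := by omega
    have e2 : f2 = -1 := by omega
    rw [if_pos e1, e2]
    simp [c1, c3, PySem.List.min?]

-- A's helper evaluated on the eur group: 'eur' is a prefix of both longer variants
lemma pvFirstIndex_eur (cs : List Char) :
    pvFirstIndex cs ["eur".toList, "euro".toList, "euros".toList] =
      PySem.Chars.find cs "eur".toList := by
  have h12 : "eur".toList <+: "euro".toList := by decide
  have h13 : "eur".toList <+: "euros".toList := by decide
  exact pvMin3_first _ _ _ (PySem.Chars.neg_one_le_find cs "eur".toList)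
    (fun h => pvFind_le_of_prefix h12 h) (fun h => pvFind_le_of_prefix h13 h)

-- A's helper evaluated on the usd group ('dollar' is a prefix of 'dollars')
lemma pvFirstIndex_usd (cs : List Char) :
    pvFirstIndex cs ["usd".toList, "dollar".toList, "dollars".toList] =
      (if PySem.Chars.find cs "usd".toList = -1 then PySem.Chars.find cs "dollar".toList
       else if PySem.Chars.find cs "dollar".toList = -1 then PySem.Chars.find cs "usd".toList
       else min (PySem.Chars.find cs "usd".toList) (PySem.Chars.find cs "dollar".toList)) := by
  have h23 : "dollar".toList <+: "dollars".toList := by decide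
  exact pvMin3_pair _ _ _ (PySem.Chars.neg_one_le_find cs "usd".toList)
    (PySem.Chars.neg_one_le_find cs "dollar".toList)
    (fun h => pvFind_le_of_prefix h23 h)


-- B's fold is the dedup-append fold over the tag stream
lemma pvScan_eq (cs : List Char) (l : List Nat) (out : List String) :
    l.foldl (fun out i =>
      if PySem.Chars.startswith (cs.drop i) "eur".toList then
        if "EUR" ∈ out then out else out ++ ["EUR"]
      else if PySem.Chars.startswith (cs.drop i) "usd".toList
           || PySem.Chars.startswith (cs.drop i) "dollar".toList then
        if "USD" ∈ out then out else out ++ ["USD"]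
      else out) out
    = (l.filterMap (pvTag cs)).foldl pvAdd out := by
  have hstep : ∀ (o : List String) (i : Nat),
      (if PySem.Chars.startswith (cs.drop i) "eur".toList then
        if "EUR" ∈ o then o else o ++ ["EUR"]
      else if PySem.Chars.startswith (cs.drop i) "usd".toList
           || PySem.Chars.startswith (cs.drop i) "dollar".toList then
        if "USD" ∈ o then o else o ++ ["USD"]
      else o)
      = (match pvTag cs i with | some t => pvAdd o t | none => o) := by
    intro o i
    simp only [pvTag, pvAdd]
    split_ifs <;> simp_all
  induction l generalizing out with
  | nil => rfl
  | cons i l ih =>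
    simp only [List.foldl_cons]
    rw [hstep]
    cases htag : pvTag cs i with
    | none =>
      rw [List.filterMap_cons_none htag]
      simp only [ih]
    | some t =>
      rw [List.filterMap_cons_some htag, List.foldl_cons]
      simp only [ih]

lemma pvAddAll_two (ts : List String) (h : ∀ t ∈ ts, t = "EUR" ∨ t = "USD")
    (out : List String) (hout : out = ["EUR", "USD"] ∨ out = ["USD", "EUR"]) :
    ts.foldl pvAdd out = out := by
  induction ts with
  | nil => rfl
  | cons t ts ih =>
    have ht := h t (by simp)
    have : pvAdd out t = out := by
      rcases hout with rfl | rfl <;> rcases ht with rfl | rfl <;> simp [pvAdd]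
    rw [List.foldl_cons, this, ih (fun x hx => h x (by simp [hx]))]

lemma pvAddAll_one (ts : List String) (a b : String)
    (hab : (a = "EUR" ∧ b = "USD") ∨ (a = "USD" ∧ b = "EUR"))
    (h : ∀ t ∈ ts, t = "EUR" ∨ t = "USD") :
    ts.foldl pvAdd [a] = if b ∈ ts then [a, b] else [a] := by
  induction ts with
  | nil => rfl
  | cons t ts ih =>
    have ht := h t (by simp)
    have hih := ih (fun x hx => h x (by simp [hx]))
    by_cases htb : t = b
    · subst htb
      have h1 : pvAdd [a] t = [a, t] := by
        rcases hab with ⟨rfl, rfl⟩ | ⟨rfl, rfl⟩ <;> rcases ht with h | h <;> simp_all [pvAdd]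
      rw [List.foldl_cons, h1]
      have := pvAddAll_two ts (fun x hx => h x (by simp [hx])) [a, t]
        (by rcases hab with ⟨rfl, rfl⟩ | ⟨rfl, rfl⟩ <;> rcases ht with h | h <;> simp_all)
      simp [this]
    · have hta : t = a := by
        rcases hab with ⟨rfl, rfl⟩ | ⟨rfl, rfl⟩ <;> rcases ht with h | h <;> simp_all
      subst hta
      rw [List.foldl_cons]
      have : pvAdd [t] t = [t] := by simp [pvAdd]
      rw [this, hih]
      have hbt : (b ∈ t :: ts) ↔ (b ∈ ts) := by
        simp only [List.mem_cons]
        exact ⟨fun h => h.resolve_left (fun h' => htb h'.symm), Or.inr⟩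
      by_cases hb : b ∈ ts
      · simp [hb, hbt.mpr hb]
      · simp only [if_neg hb]
        rw [if_neg (fun hc => hb (hbt.mp hc))]

-- every tag is EUR or USD
lemma pvTag_mem (cs : List Char) {t : String} {i : Nat} (h : pvTag cs i = some t) :
    t = "EUR" ∨ t = "USD" := by
  unfold pvTag at h
  split_ifs at h <;> simp_all

lemma pvTags_vals (cs : List Char) (l : List Nat) :
    ∀ t ∈ l.filterMap (pvTag cs), t = "EUR" ∨ t = "USD" := by
  intro t ht
  obtain ⟨i, _, hi⟩ := List.mem_filterMap.mp ht
  exact pvTag_mem cs hi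


-- tags: the option-valued match stream over all positions
lemma pvTag_eq_eur_iff (cs : List Char) (i : Nat) :
    pvTag cs i = some "EUR" ↔ pvOcc cs "eur".toList i := by
  unfold pvTag
  rw [pvOcc]
  split_ifs with h1 h2 <;>
    simp_all [PySem.Chars.startswith_iff]

-- no position matches both groups (their first characters differ)
lemma pvDisj (cs : List Char) (i : Nat) (he : pvOcc cs "eur".toList i) :
    ¬ (pvOcc cs "usd".toList i ∨ pvOcc cs "dollar".toList i) := by
  rintro (h | h) <;>
  · rcases List.prefix_or_prefix_of_prefix he h with hc | hc <;> (revert hc; decide)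

lemma pvTag_eq_usd_of (cs : List Char) (i : Nat)
    (h : pvOcc cs "usd".toList i ∨ pvOcc cs "dollar".toList i) :
    pvTag cs i = some "USD" := by
  have h1 : ¬ PySem.Chars.startswith (cs.drop i) "eur".toList = true := by
    rw [PySem.Chars.startswith_iff]
    exact fun hp => pvDisj cs i hp h
  have h2 : (PySem.Chars.startswith (cs.drop i) "usd".toList
      || PySem.Chars.startswith (cs.drop i) "dollar".toList) = true := by
    rw [Bool.or_eq_true, PySem.Chars.startswith_iff, PySem.Chars.startswith_iff]
    exact h
  unfold pvTag
  rw [if_neg h1, if_pos h2]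

lemma pvTag_none_iff (cs : List Char) (i : Nat) :
    pvTag cs i = none ↔
      ¬ pvOcc cs "eur".toList i ∧ ¬ pvOcc cs "usd".toList i ∧ ¬ pvOcc cs "dollar".toList i := by
  unfold pvTag
  split_ifs with h1 h2 <;> (simp_all [PySem.Chars.startswith_iff, pvOcc]; try tauto)

lemma pvMemTags_eur (cs : List Char) :
    "EUR" ∈ (List.range cs.length).filterMap (pvTag cs) ↔ ∃ i, pvOcc cs "eur".toList i := by
  rw [List.mem_filterMap]
  constructor
  · rintro ⟨i, -, hi⟩
    exact ⟨i, (pvTag_eq_eur_iff cs i).1 hi⟩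
  · rintro ⟨i, hi⟩
    exact ⟨i, List.mem_range.mpr (pvOcc_lt_length (by decide) hi),
      (pvTag_eq_eur_iff cs i).2 hi⟩

lemma pvMemTags_usd (cs : List Char) :
    "USD" ∈ (List.range cs.length).filterMap (pvTag cs) ↔
      ∃ i, pvOcc cs "usd".toList i ∨ pvOcc cs "dollar".toList i := by
  rw [List.mem_filterMap]
  constructor
  · rintro ⟨i, -, hi⟩
    refine ⟨i, ?_⟩
    unfold pvTag at hi
    split_ifs at hi with h1 h2 <;> simp_all [PySem.Chars.startswith_iff, pvOcc]
  · rintro ⟨i, hi⟩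
    refine ⟨i, List.mem_range.mpr ?_, pvTag_eq_usd_of cs i hi⟩
    rcases hi with h | h
    · exact pvOcc_lt_length (by decide) h
    · exact pvOcc_lt_length (by decide) h

-- splitting the tag stream at the first matching position
lemma pvTags_first (cs : List Char) (j : Nat) (hj : j < cs.length) (v : String)
    (hv : pvTag cs j = some v) (hmin : ∀ i < j, pvTag cs i = none) :
    (List.range cs.length).filterMap (pvTag cs)
      = v :: (List.range' (j + 1) (cs.length - (j + 1))).filterMap (pvTag cs) := by
  have hsplit : List.range cs.length = List.range' 0 j ++ List.range' j (cs.length - j) := by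
    rw [List.range_eq_range', show cs.length = j + (cs.length - j) by omega,
      ← List.range'_append]
    simp
  have hstep : List.range' j (cs.length - j) = j :: List.range' (j + 1) (cs.length - (j + 1)) := by
    have h1 : cs.length - j = (cs.length - (j + 1)) + 1 := by omega
    rw [h1, List.range'_succ]
  rw [hsplit, List.filterMap_append, hstep, List.filterMap_cons_some hv]
  have hnil : (List.range' 0 j).filterMap (pvTag cs) = [] := by
    rw [List.filterMap_eq_nil_iff]
    intro i hi
    exact hmin i (by have := List.mem_range'_1.mp hi; omega)
  rw [hnil, List.nil_append]

-- B's whole fold, when position j carries the first tag v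
lemma pvFold_result (cs : List Char) (j : Nat) (hj : j < cs.length) (v w : String)
    (hvw : (v = "EUR" ∧ w = "USD") ∨ (v = "USD" ∧ w = "EUR"))
    (hv : pvTag cs j = some v) (hmin : ∀ i < j, pvTag cs i = none) :
    ((List.range cs.length).filterMap (pvTag cs)).foldl pvAdd []
      = if w ∈ (List.range cs.length).filterMap (pvTag cs) then [v, w] else [v] := by
  rw [pvTags_first cs j hj v hv hmin]
  set rest := (List.range' (j + 1) (cs.length - (j + 1))).filterMap (pvTag cs) with hrest
  have hvals : ∀ t ∈ rest, t = "EUR" ∨ t = "USD" := pvTags_vals cs _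
  have h0 : pvAdd [] v = [v] := by simp [pvAdd]
  rw [List.foldl_cons, h0, pvAddAll_one rest v w hvw hvals]
  have hvw' : v ≠ w := by rcases hvw with ⟨rfl, rfl⟩ | ⟨rfl, rfl⟩ <;> decide
  have hmem : (w ∈ v :: rest) ↔ (w ∈ rest) := by
    simp only [List.mem_cons]
    exact ⟨fun h => h.resolve_left (fun h' => hvw' h'.symm), Or.inr⟩
  by_cases hw : w ∈ rest
  · rw [if_pos hw, if_pos (hmem.mpr hw)]
  · rw [if_neg hw, if_neg (fun hc => hw (hmem.mp hc))]

-- A's usd index behaves like a first-occurrence search for 'usd' or 'dollar'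
lemma pvU_spec (cs : List Char) (u : Int)
    (hdef : u = (if PySem.Chars.find cs "usd".toList = -1 then PySem.Chars.find cs "dollar".toList
       else if PySem.Chars.find cs "dollar".toList = -1 then PySem.Chars.find cs "usd".toList
       else min (PySem.Chars.find cs "usd".toList) (PySem.Chars.find cs "dollar".toList)))
    (hu : u ≠ -1) :
    0 ≤ u ∧ (pvOcc cs "usd".toList u.toNat ∨ pvOcc cs "dollar".toList u.toNat) ∧
      ∀ i, (pvOcc cs "usd".toList i ∨ pvOcc cs "dollar".toList i) → u.toNat ≤ i := by
  have hb1 := PySem.Chars.neg_one_le_find cs "usd".toList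
  have hb2 := PySem.Chars.neg_one_le_find cs "dollar".toList
  have hmin : ∀ i, (pvOcc cs "usd".toList i ∨ pvOcc cs "dollar".toList i) → u.toNat ≤ i := by
    rintro i (h | h)
    · have h1 : PySem.Chars.find cs "usd".toList ≠ -1 := by
        rw [ne_eq, pvFind_eq_neg_one_iff]; exact fun hc => hc ⟨i, h⟩
      obtain ⟨h0, -, hm⟩ := pvFind_spec h1
      have := hm i h
      have hle : u ≤ PySem.Chars.find cs "usd".toList := by
        rw [hdef]; split_ifs <;> omega
      omega
    · have h1 : PySem.Chars.find cs "dollar".toList ≠ -1 := by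
        rw [ne_eq, pvFind_eq_neg_one_iff]; exact fun hc => hc ⟨i, h⟩
      obtain ⟨h0, -, hm⟩ := pvFind_spec h1
      have := hm i h
      have hle : u ≤ PySem.Chars.find cs "dollar".toList := by
        rw [hdef]; split_ifs <;> omega
      omega
  refine ⟨?_, ?_, hmin⟩
  · rw [hdef]; rw [hdef] at hu; split_ifs at hu ⊢ <;> omega
  · by_cases a : PySem.Chars.find cs "usd".toList = -1
    · have hb : PySem.Chars.find cs "dollar".toList ≠ -1 := by
        rw [hdef, if_pos a] at hu; exact hu
      obtain ⟨-, hocc, -⟩ := pvFind_spec hb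
      right
      have : u = PySem.Chars.find cs "dollar".toList := by rw [hdef, if_pos a]
      rw [this]; exact hocc
    · by_cases b : PySem.Chars.find cs "dollar".toList = -1
      · obtain ⟨-, hocc, -⟩ := pvFind_spec a
        left
        have : u = PySem.Chars.find cs "usd".toList := by rw [hdef, if_neg a, if_pos b]
        rw [this]; exact hocc
      · rcases min_choice (PySem.Chars.find cs "usd".toList) (PySem.Chars.find cs "dollar".toList)
          with h | h
        · obtain ⟨-, hocc, -⟩ := pvFind_spec a
          left
          have : u = PySem.Chars.find cs "usd".toList := by rw [hdef, if_neg a, if_neg b, h]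
          rw [this]; exact hocc
        · obtain ⟨-, hocc, -⟩ := pvFind_spec b
          right
          have : u = PySem.Chars.find cs "dollar".toList := by rw [hdef, if_neg a, if_neg b, h]
          rw [this]; exact hocc

lemma pvU_none (cs : List Char) (u : Int)
    (hdef : u = (if PySem.Chars.find cs "usd".toList = -1 then PySem.Chars.find cs "dollar".toList
       else if PySem.Chars.find cs "dollar".toList = -1 then PySem.Chars.find cs "usd".toList
       else min (PySem.Chars.find cs "usd".toList) (PySem.Chars.find cs "dollar".toList)))
    (hu : u = -1) (i : Nat) :
    ¬ pvOcc cs "usd".toList i ∧ ¬ pvOcc cs "dollar".toList i := by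
  have hb1 := PySem.Chars.neg_one_le_find cs "usd".toList
  have hb2 := PySem.Chars.neg_one_le_find cs "dollar".toList
  have h12 : PySem.Chars.find cs "usd".toList = -1 ∧ PySem.Chars.find cs "dollar".toList = -1 := by
    rw [hu] at hdef
    by_cases a : PySem.Chars.find cs "usd".toList = -1 <;>
      by_cases b : PySem.Chars.find cs "dollar".toList = -1
    · exact ⟨a, b⟩
    · rw [if_pos a] at hdef
      exact absurd hdef.symm b
    · rw [if_neg a, if_pos b] at hdef
      exact absurd hdef.symm a
    · rw [if_neg a, if_neg b] at hdef
      rcases min_choice (PySem.Chars.find cs "usd".toList)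
        (PySem.Chars.find cs "dollar".toList) with h | h <;> rw [h] at hdef <;> omega
  exact ⟨fun hc => ((pvFind_eq_neg_one_iff cs "usd".toList).1 h12.1) ⟨i, hc⟩,
         fun hc => ((pvFind_eq_neg_one_iff cs "dollar".toList).1 h12.2) ⟨i, hc⟩⟩

-- Python's stable sort on the concrete two-element position lists
lemma pvSorted_one (x : String × Int) :
    PySem.List.sorted [x] (fun p => p.2) false = [x] :=
  PySem.List.sorted_eq_self_of_pairwise [x] (fun p => p.2) (by simp)

lemma pvSorted_two_le (x y : String × Int) (h : x.2 ≤ y.2) :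
    PySem.List.sorted [x, y] (fun p => p.2) false = [x, y] :=
  PySem.List.sorted_eq_self_of_pairwise [x, y] (fun p => p.2) (by simp [h])

lemma pvSorted_two_gt (x y : String × Int) (h : y.2 < x.2) :
    PySem.List.sorted [x, y] (fun p => p.2) false = [y, x] :=
  PySem.List.sorted_eq_of_perm_of_pairwise_lt [x, y] [y, x] (fun p => p.2)
    (List.Perm.swap x y []) (by simp [h])

-- ===== VERDICT (by name: the statement is the Claim_ definition above) =====
theorem map_to_currencies_py_spec : Claim_equal_map_to_currencies_py := by
  intro headline _
  show map_to_currencies_py headline = map_to_currencies_py_alt headline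
  unfold map_to_currencies_py map_to_currencies_py_alt
  simp only [pvFirstIndex_eur, pvFirstIndex_usd, pvScan_eq, List.nil_append]
  set cs := PySem.Chars.lower headline.toList with hcs
  set E := PySem.Chars.find cs "eur".toList with hE
  set u := (if PySem.Chars.find cs "usd".toList = -1 then PySem.Chars.find cs "dollar".toList
     else if PySem.Chars.find cs "dollar".toList = -1 then PySem.Chars.find cs "usd".toList
     else min (PySem.Chars.find cs "usd".toList) (PySem.Chars.find cs "dollar".toList)) with hu
  have hbE : -1 ≤ E := PySem.Chars.neg_one_le_find cs "eur".toList
  by_cases hE0 : E = -1 <;> by_cases hu0 : u = -1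
  · -- neither currency is mentioned
    rw [if_neg (by omega), if_neg (by omega)]
    have htags : (List.range cs.length).filterMap (pvTag cs) = [] := by
      rw [List.filterMap_eq_nil_iff]
      intro i _
      rw [pvTag_none_iff]
      obtain ⟨hn1, hn2⟩ := pvU_none cs u hu hu0 i
      exact ⟨fun hc => ((pvFind_eq_neg_one_iff cs "eur".toList).1 (hE ▸ hE0)) ⟨i, hc⟩, hn1, hn2⟩
    rw [htags]
    rw [show PySem.List.sorted ([] : List (String × Int)) (fun x => x.2) false = [] by
      rw [PySem.List.sorted_eq_nil_iff]]
    rfl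
  · -- only USD is mentioned
    obtain ⟨hu1, hocc, hmin⟩ := pvU_spec cs u hu hu0
    rw [if_pos hu1, if_neg (show ¬ (0 ≤ E) by omega), List.nil_append, pvSorted_one]
    set k := u.toNat with hk
    have hnoeur : ∀ i, ¬ pvOcc cs "eur".toList i :=
      fun i hc => ((pvFind_eq_neg_one_iff cs "eur".toList).1 (hE ▸ hE0)) ⟨i, hc⟩
    have hkl : k < cs.length := by
      rcases hocc with h | h
      · exact pvOcc_lt_length (by decide) h
      · exact pvOcc_lt_length (by decide) h
    have hv : pvTag cs k = some "USD" := pvTag_eq_usd_of cs k hocc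
    have hmin' : ∀ i < k, pvTag cs i = none := by
      intro i hik
      rw [pvTag_none_iff]
      refine ⟨hnoeur i, ?_, ?_⟩
      · exact fun hc => absurd (hmin i (Or.inl hc)) (by omega)
      · exact fun hc => absurd (hmin i (Or.inr hc)) (by omega)
    rw [pvFold_result cs k hkl "USD" "EUR" (Or.inr ⟨rfl, rfl⟩) hv hmin']
    rw [if_neg (fun hc => hnoeur _ ((pvMemTags_eur cs).1 hc).choose_spec)]
    rfl
  · -- only EUR is mentioned
    obtain ⟨hE1, hEocc, hEmin⟩ := pvFind_spec (cs := cs) (sub := "eur".toList) (hE ▸ hE0)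
    rw [if_neg (show ¬ (0 ≤ u) by omega), if_pos (show (0:Int) ≤ E by omega), pvSorted_one]
    set j := E.toNat with hj
    have hjl : j < cs.length := pvOcc_lt_length (by decide) hEocc
    have hv : pvTag cs j = some "EUR" := (pvTag_eq_eur_iff cs j).2 hEocc
    have hmin' : ∀ i < j, pvTag cs i = none := by
      intro i hij
      rw [pvTag_none_iff]
      obtain ⟨hn1, hn2⟩ := pvU_none cs u hu hu0 i
      exact ⟨fun hc => absurd (hEmin i hc) (by omega), hn1, hn2⟩
    rw [pvFold_result cs j hjl "EUR" "USD" (Or.inl ⟨rfl, rfl⟩) hv hmin']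
    rw [if_neg (fun hc => by
      obtain ⟨i, hi⟩ := (pvMemTags_usd cs).1 hc
      obtain ⟨hn1, hn2⟩ := pvU_none cs u hu hu0 i
      rcases hi with h | h
      exacts [hn1 h, hn2 h])]
    rfl
  · -- both currencies are mentioned: order by first position
    obtain ⟨hE1, hEocc, hEmin⟩ := pvFind_spec (cs := cs) (sub := "eur".toList) (hE ▸ hE0)
    obtain ⟨hu1, hUocc, hUmin⟩ := pvU_spec cs u hu hu0
    set j := E.toNat with hj
    set k := u.toNat with hk
    have hjl : j < cs.length := pvOcc_lt_length (by decide) hEocc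
    have hkl : k < cs.length := by
      rcases hUocc with h | h
      · exact pvOcc_lt_length (by decide) h
      · exact pvOcc_lt_length (by decide) h
    have hjk : j ≠ k := by
      intro hc
      exact pvDisj cs j hEocc (hc ▸ hUocc)
    rw [if_pos hu1, if_pos (show (0:Int) ≤ E by omega), List.singleton_append]
    have hEurMem : "EUR" ∈ (List.range cs.length).filterMap (pvTag cs) :=
      (pvMemTags_eur cs).2 ⟨j, hEocc⟩
    have hUsdMem : "USD" ∈ (List.range cs.length).filterMap (pvTag cs) :=
      (pvMemTags_usd cs).2 ⟨k, hUocc⟩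
    rcases Nat.lt_or_ge j k with hlt | hge
    · -- EUR first
      rw [pvSorted_two_le ("EUR", E) ("USD", u) (by simp; omega)]
      have hmin' : ∀ i < j, pvTag cs i = none := by
        intro i hij
        rw [pvTag_none_iff]
        refine ⟨fun hc => absurd (hEmin i hc) (by omega),
          fun hc => absurd (hUmin i (Or.inl hc)) (by omega),
          fun hc => absurd (hUmin i (Or.inr hc)) (by omega)⟩
      rw [pvFold_result cs j hjl "EUR" "USD" (Or.inl ⟨rfl, rfl⟩)
        ((pvTag_eq_eur_iff cs j).2 hEocc) hmin']
      rw [if_pos hUsdMem]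
      rfl
    · -- USD first
      have hlt : k < j := by omega
      rw [pvSorted_two_gt ("EUR", E) ("USD", u) (by simp; omega)]
      have hmin' : ∀ i < k, pvTag cs i = none := by
        intro i hik
        rw [pvTag_none_iff]
        refine ⟨fun hc => absurd (hEmin i hc) (by omega),
          fun hc => absurd (hUmin i (Or.inl hc)) (by omega),
          fun hc => absurd (hUmin i (Or.inr hc)) (by omega)⟩
      rw [pvFold_result cs k hkl "USD" "EUR" (Or.inr ⟨rfl, rfl⟩)
        (pvTag_eq_usd_of cs k hUocc) hmin']
      rw [if_pos hEurMem]
      rfl
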